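-- pv_equiv track=rewrite | github.com/kevr/kevr.0cost.org | app/views.py | columns_to_rows
-- ===== SOURCE A (Python) =====
-- def columns_to_rows(columns: list) -> list[list[str]]:
--     """ Split an arbitrary number of columns into enough
--     rows to hold three columns worth of data. """
--     output = []
--     for i in range(0, 3):
--         current = []
--         for j in range(0, int(len(columns) / 3)):
--             current.append(columns[i + j * 3])
--         output.append(current)
--     return output
-- ===== SOURCE B (Python) =====
-- def columns_to_rows(columns: list) -> list[list[str]]:
--     """Single linear sweep: deposit each of the first 3*(len//3)
--     elements into the row chosen by its index modulo 3."""
--     n = len(columns) // 3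
--     rows = [[], [], []]
--     for idx in range(3 * n):
--         rows[idx % 3].append(columns[idx])
--     return rows
-- ===== Notes on version B (the rewrite author's own statement) =====
-- stated objective: alternative
-- what changed: Replaced the column-major nested gather (strided index i + j*3 over two loops) by a single row-major linear pass that appends each element to the bucket selected by its index modulo 3, iterating only over the first 3*(len//3) elements so trailing leftovers are dropped exactly as in A.
import Mathlib
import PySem

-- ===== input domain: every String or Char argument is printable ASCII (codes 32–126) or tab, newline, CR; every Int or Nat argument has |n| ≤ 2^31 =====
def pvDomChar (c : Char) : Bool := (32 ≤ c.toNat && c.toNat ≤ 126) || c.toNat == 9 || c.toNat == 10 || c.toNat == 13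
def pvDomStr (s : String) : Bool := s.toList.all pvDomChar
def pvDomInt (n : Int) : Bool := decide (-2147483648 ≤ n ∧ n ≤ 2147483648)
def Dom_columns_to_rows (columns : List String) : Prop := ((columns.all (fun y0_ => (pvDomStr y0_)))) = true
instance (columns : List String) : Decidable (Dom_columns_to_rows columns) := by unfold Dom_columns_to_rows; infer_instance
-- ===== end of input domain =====

-- B replaces A's column-major nested gather by a single row-major pass bucketing by index mod 3 (alternative decomposition, same cost).

-- ===== PORT A =====
-- literal port of A: outer loop i in range(0,3); inner loop j in range(0, int(len/3)) appending columns[i + j*3]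
def columns_to_rows (columns : List String) : List (List String) :=
  (PySem.List.pyRange 0 3 1).foldl
    (fun output i =>
      output ++
        [(PySem.List.pyRange 0 (PySem.Int.floordiv (columns.length : Int) 3) 1).foldl
          (fun current j => current ++ [PySem.List.pyGetD columns (i + j * 3) ""]) []])
    []

-- ===== PORT B =====
-- literal port of B: n = len//3; one pass idx in range(3*n), append columns[idx] to rows[idx % 3]
def columns_to_rows_alt (columns : List String) : List (List String) :=
  let n : Int := PySem.Int.floordiv (columns.length : Int) 3
  let rows :=
    (PySem.List.pyRange 0 (3 * n) 1).foldl
      (fun (rs : List String × List String × List String) idx =>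
        if PySem.Int.mod idx 3 = 0 then (rs.1 ++ [PySem.List.pyGetD columns idx ""], rs.2.1, rs.2.2)
        else if PySem.Int.mod idx 3 = 1 then (rs.1, rs.2.1 ++ [PySem.List.pyGetD columns idx ""], rs.2.2)
        else (rs.1, rs.2.1, rs.2.2 ++ [PySem.List.pyGetD columns idx ""]))
      ([], [], [])
  [rows.1, rows.2.1, rows.2.2]

-- ===== PRECONDITION & SPEC =====
def Spec_columns_to_rows (columns : List String) (out : List (List String)) : Prop := out = columns_to_rows_alt columns
instance (columns : List String) (out : List (List String)) : Decidable (Spec_columns_to_rows columns out) := by unfold Spec_columns_to_rows; infer_instance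

-- ===== CLAIM (what is proved, stated in full; the proofs are below) =====
def Claim_equal_columns_to_rows : Prop := ∀ (columns : List String), Dom_columns_to_rows columns → Spec_columns_to_rows columns (columns_to_rows columns)

-- ===== LEMMAS AND PROOFS =====

-- B's fold, processing three consecutive indices per round, builds the three strided rows.
theorem alt_fold_inv (g : Int → String) (m : Nat) (a b c : List String) :
    (PySem.List.pyRange 0 (3 * (m : Int)) 1).foldl
      (fun (rs : List String × List String × List String) idx =>
        if PySem.Int.mod idx 3 = 0 then (rs.1 ++ [g idx], rs.2.1, rs.2.2)
        else if PySem.Int.mod idx 3 = 1 then (rs.1, rs.2.1 ++ [g idx], rs.2.2)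
        else (rs.1, rs.2.1, rs.2.2 ++ [g idx]))
      (a, b, c)
    = (a ++ (List.range m).map (fun j : Nat => g (3 * (j : Int))),
       b ++ (List.range m).map (fun j : Nat => g (3 * (j : Int) + 1)),
       c ++ (List.range m).map (fun j : Nat => g (3 * (j : Int) + 2))) := by
  induction m generalizing a b c with
  | zero => simp [PySem.List.pyRange_one_eq_nil]
  | succ m ih =>
      have hsplit : PySem.List.pyRange 0 (3 * ((m : Int) + 1)) 1
          = PySem.List.pyRange 0 (3 * (m : Int)) 1 ++ [3 * (m : Int), 3 * (m : Int) + 1, 3 * (m : Int) + 1 + 1] := by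
        have h1 : PySem.List.pyRange 0 (3 * ((m : Int) + 1)) 1
            = PySem.List.pyRange 0 (3 * (m : Int)) 1 ++ PySem.List.pyRange (3 * (m : Int)) (3 * ((m : Int) + 1)) 1 :=
          PySem.List.pyRange_one_append 0 (3 * (m : Int)) (3 * ((m : Int) + 1)) (by positivity) (by omega)
        rw [h1]
        congr 1
        rw [PySem.List.pyRange_one_cons (by omega), PySem.List.pyRange_one_cons (by omega),
            PySem.List.pyRange_one_cons (by omega), PySem.List.pyRange_one_eq_nil (by omega)]
      have h0 : PySem.Int.mod (3 * (m : Int)) 3 = 0 := by simp [PySem.Int.mod]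
      have h1 : PySem.Int.mod (3 * (m : Int) + 1) 3 = 1 := by simp [PySem.Int.mod]
      have h2 : PySem.Int.mod (3 * (m : Int) + 1 + 1) 3 = 2 := by
        have e : (3 * (m : Int) + 1 + 1) = 3 * (m : Int) + 2 := by ring
        rw [e]; simp [PySem.Int.mod]
      push_cast
      rw [hsplit, List.foldl_append, ih]
      simp only [List.foldl, h0, h1, h2, List.range_succ, List.map_append, List.map_cons, List.map_nil]
      push_cast
      have e2 : (3 * (m : Int) + 1 + 1) = 3 * (m : Int) + 2 := by ring
      rw [e2]
      simp [List.append_assoc]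

theorem columns_to_rows_spec' (columns : List String) :
    columns_to_rows columns = columns_to_rows_alt columns := by
  unfold columns_to_rows columns_to_rows_alt
  set n : Int := PySem.Int.floordiv (columns.length : Int) 3 with hn
  have hn0 : 0 ≤ n := by
    rw [hn]
    simp only [PySem.Int.floordiv]
    exact Int.fdiv_nonneg (by positivity) (by norm_num)
  set g : Int → String := fun idx => PySem.List.pyGetD columns idx "" with hg
  have hb := alt_fold_inv g n.toNat ([] : List String) ([] : List String) ([] : List String)
  rw [Int.toNat_of_nonneg hn0] at hb
  simp only []
  rw [hb]
  have houter : PySem.List.pyRange 0 3 1 = [0, 1, 2] := by decide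
  rw [houter]
  have hinner : ∀ i : Int, (PySem.List.pyRange 0 n 1).foldl
      (fun current j => current ++ [PySem.List.pyGetD columns (i + j * 3) ""]) []
      = (List.range n.toNat).map (fun k : Nat => g (i + (0 + (k : Int)) * 3)) := by
    intro i
    rw [PySem.List.foldl_append_singleton_eq_map, PySem.List.pyRange_one, List.map_map]
    simp [hg, Function.comp]
  simp only [List.foldl, hinner]
  simp only [List.nil_append, List.cons_append, List.cons.injEq, and_true]
  refine ⟨?_, ?_, ?_⟩ <;>
    · apply List.map_congr_left
      intro k _
      simp only [hg]
      congr 1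
      ring

-- ===== VERDICT (by name: the statement is the Claim_ definition above) =====
theorem columns_to_rows_spec : Claim_equal_columns_to_rows := by
  intro columns _
  exact columns_to_rows_spec' columns
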